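-- pv_equiv track=rewrite | github.com/kcharellano/PSL_KGE | scripts/psl_prep.py | map_constituents
-- ===== SOURCE A (Python) =====
-- ENTITY_1 = 0
--
-- ENTITY_2 = 2
--
-- RELATION = 1
--
-- def map_constituents(triple_list):
--     entity_map = {}
--     relation_map = {}
--     entity_count = 0
--     relation_count = 0
--     for triple in triple_list:
--         if not triple[ENTITY_1] in entity_map:
--             entity_map[triple[ENTITY_1]] = str(entity_count)
--             entity_count += 1
--         if not triple[RELATION] in relation_map:
--             relation_map[triple[RELATION]] = str(relation_count)
--             relation_count += 1
--         if not triple[ENTITY_2] in entity_map: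
--             entity_map[triple[ENTITY_2]] = str(entity_count)
--             entity_count += 1
--
--     return entity_map, relation_map
-- ===== SOURCE B (Python) =====
-- def _rank(seq):
--     # first occurrence index of each key: overwrite while scanning in reverse
--     first = {k: i for i, k in reversed(list(enumerate(seq)))}
--     order = sorted(first, key=first.__getitem__)
--     return {k: str(r) for r, k in enumerate(order)}
--
-- def map_constituents(triple_list):
--     entities = [e for triple in triple_list for e in (triple[0], triple[2])]
--     relations = [triple[1] for triple in triple_list]
--     return _rank(entities), _rank(relations)
-- ===== Notes on version B (the rewrite author's own statement) =====
-- stated objective: alternative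
-- what changed: Replaces A's single pass of interleaved membership tests and running counters with a sort-based ranking: a reverse overwrite pass records each key's first-occurrence position, then the keys are sorted by that position and numbered by enumeration.
import Mathlib
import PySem

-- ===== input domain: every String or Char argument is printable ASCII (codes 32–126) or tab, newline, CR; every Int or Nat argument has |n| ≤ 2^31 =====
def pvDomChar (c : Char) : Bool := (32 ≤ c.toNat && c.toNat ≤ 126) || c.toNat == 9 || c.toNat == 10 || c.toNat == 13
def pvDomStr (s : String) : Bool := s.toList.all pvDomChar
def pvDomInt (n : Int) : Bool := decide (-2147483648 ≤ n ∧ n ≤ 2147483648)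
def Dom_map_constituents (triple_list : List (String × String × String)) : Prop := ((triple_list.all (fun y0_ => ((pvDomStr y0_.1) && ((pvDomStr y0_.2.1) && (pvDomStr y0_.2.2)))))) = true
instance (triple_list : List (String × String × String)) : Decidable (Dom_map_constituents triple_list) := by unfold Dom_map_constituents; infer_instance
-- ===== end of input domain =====

-- B replaces A's interleaved membership-test-and-counter loop by a sort-based ranking:
-- a reverse overwrite pass records each key's first position, then sorting the keys by
-- that position and enumerating assigns the indices (alternative algorithm, same results).

-- ===== PORT A =====
-- the body of each of A's three identical "if key not seen: assign str(count); count += 1" blocks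
def mcStep (s : PySem.Dict String String × Int) (k : String) : PySem.Dict String String × Int :=
  if s.1.contains k then s else (s.1.insert k (PySem.Int.toStr s.2), s.2 + 1)

def map_constituents (triple_list : List (String × String × String)) :
    (List (String × String)) × (List (String × String)) :=
  let st := triple_list.foldl
    (fun st t =>
      let e1 := mcStep (st.1, st.2.1) t.1            -- if not triple[ENTITY_1] in entity_map: …
      let r  := mcStep (st.2.2.1, st.2.2.2) t.2.1    -- if not triple[RELATION] in relation_map: …
      let e2 := mcStep e1 t.2.2                      -- if not triple[ENTITY_2] in entity_map: …
      (e2.1, e2.2, r.1, r.2))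
    (PySem.Dict.empty, 0, PySem.Dict.empty, 0)
  (st.1.items, st.2.2.1.items)

-- ===== PORT B =====
-- first = {k: i for i, k in reversed(list(enumerate(seq)))}
def rankDict (seq : List String) : PySem.Dict String Int :=
  (PySem.List.enumerate seq 0).reverse.foldl (fun d p => d.insert p.2 p.1) PySem.Dict.empty

-- order = sorted(first, key=first.__getitem__); {k: str(r) for r, k in enumerate(order)}
-- (every key sorted looks up is in the dict, so getD with an unused default is exact for __getitem__)
def rank (seq : List String) : List (String × String) :=
  let first := rankDict seq
  let order := PySem.List.sorted first.keys (fun k => first.getD k 0)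
  (PySem.List.enumerate order 0).map (fun p => (p.2, PySem.Int.toStr p.1))

def map_constituents_alt (triple_list : List (String × String × String)) :
    (List (String × String)) × (List (String × String)) :=
  (rank (triple_list.flatMap fun t => [t.1, t.2.2]),   -- [e for t in tl for e in (t[0], t[2])]
   rank (triple_list.map fun t => t.2.1))              -- [t[1] for t in tl]

-- ===== PRECONDITION & SPEC =====
def Spec_map_constituents (triple_list : List (String × String × String)) (out : (List (String × String)) × (List (String × String))) : Prop := out = map_constituents_alt triple_list
instance (triple_list : List (String × String × String)) (out : (List (String × String)) × (List (String × String))) : Decidable (Spec_map_constituents triple_list out) := by unfold Spec_map_constituents; infer_instance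

-- ===== CLAIM (what is proved, stated in full; the proofs are below) =====
def Claim_equal_map_constituents : Prop := ∀ (triple_list : List (String × String × String)), Dom_map_constituents triple_list → Spec_map_constituents triple_list (map_constituents triple_list)

-- ===== LEMMAS AND PROOFS =====

-- the common normal form both programs reach: first occurrences of `ks`, numbered in order
def canonItems (ks : List String) : List (String × String) :=
  (PySem.List.enumerate (PySem.List.dedup ks) 0).map (fun p => (p.2, PySem.Int.toStr p.1))

-- ---------- A-side: the dict A is building after having seen the key sequence `ks` ----------
def idxD (ks : List String) : PySem.Dict String String := PySem.Dict.mk (canonItems ks)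

theorem keys_idxD (ks : List String) : (idxD ks).keys = PySem.List.dedup ks := by
  simp [idxD, canonItems, PySem.Dict.keys, List.map_map, Function.comp_def,
    PySem.List.map_snd_enumerate]

theorem contains_idxD (ks : List String) (k : String) :
    (idxD ks).contains k = decide (k ∈ ks) := by
  rw [PySem.Dict.contains_eq_decide_mem_keys, keys_idxD]
  simp

theorem dedup_append_mem (ks : List String) (k : String) (h : k ∈ ks) :
    PySem.List.dedup (ks ++ [k]) = PySem.List.dedup ks := by
  have hm : k ∈ PySem.Set.ofList ks := by simpa [PySem.Set.mem_ofList] using h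
  simp only [PySem.List.dedup_eq_ofList, PySem.Set.ofList_append_singleton]
  rw [PySem.Set.add_of_mem hm]

theorem dedup_append_not_mem (ks : List String) (k : String) (h : k ∉ ks) :
    PySem.List.dedup (ks ++ [k]) = PySem.List.dedup ks ++ [k] := by
  have hm : k ∉ PySem.Set.ofList ks := by simpa [PySem.Set.mem_ofList] using h
  simp only [PySem.List.dedup_eq_ofList, PySem.Set.ofList_append_singleton]
  rw [PySem.Set.add_of_not_mem hm]

theorem canonItems_append_mem (ks : List String) (k : String) (h : k ∈ ks) :
    canonItems (ks ++ [k]) = canonItems ks := by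
  simp only [canonItems]
  rw [dedup_append_mem ks k h]

theorem canonItems_append_not_mem (ks : List String) (k : String) (h : k ∉ ks) :
    canonItems (ks ++ [k])
      = canonItems ks ++ [(k, PySem.Int.toStr ((PySem.List.dedup ks).length : Int))] := by
  simp only [canonItems]
  rw [dedup_append_not_mem ks k h, PySem.List.enumerate_append]
  simp [PySem.List.enumerate_cons, PySem.List.enumerate_nil]

theorem foldl_mcStep_idxD (ks : List String) : ∀ seen : List String,
    ks.foldl mcStep (idxD seen, ((PySem.List.dedup seen).length : Int))
      = (idxD (seen ++ ks), ((PySem.List.dedup (seen ++ ks)).length : Int)) := by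
  induction ks with
  | nil => intro seen; simp
  | cons k ks ih =>
    intro seen
    rw [List.foldl_cons]
    by_cases hk : k ∈ seen
    · have hstep : mcStep (idxD seen, ((PySem.List.dedup seen).length : Int)) k
          = (idxD seen, ((PySem.List.dedup seen).length : Int)) := by
        simp [mcStep, contains_idxD, hk]
      rw [hstep]
      have h1 : idxD seen = idxD (seen ++ [k]) := by
        simp [idxD, canonItems_append_mem seen k hk]
      have h2 : PySem.List.dedup seen = PySem.List.dedup (seen ++ [k]) :=
        (dedup_append_mem seen k hk).symm
      rw [h1, h2, ih (seen ++ [k])]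
      simp
    · have hstep : mcStep (idxD seen, ((PySem.List.dedup seen).length : Int)) k
          = (idxD (seen ++ [k]), ((PySem.List.dedup (seen ++ [k])).length : Int)) := by
        simp only [mcStep, contains_idxD, hk, decide_false, if_neg Bool.false_ne_true]
        refine Prod.ext_iff.mpr ⟨?_, ?_⟩
        · apply PySem.Dict.ext
          rw [PySem.Dict.items_insert_of_not_contains _ _ (by simp [contains_idxD, hk])]
          exact (canonItems_append_not_mem seen k hk).symm
        · rw [dedup_append_not_mem seen k hk]
          simp [List.length_append]
      rw [hstep, ih (seen ++ [k])]
      simp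

-- A's combined loop splits into an entity loop over the flattened entity keys and a
-- relation loop over the relation keys (the two states never interact)
theorem foldl_split (tl : List (String × String × String)) :
    ∀ (em : PySem.Dict String String) (ec : Int) (rm : PySem.Dict String String) (rc : Int),
    tl.foldl
      (fun st t =>
        let e1 := mcStep (st.1, st.2.1) t.1
        let r  := mcStep (st.2.2.1, st.2.2.2) t.2.1
        let e2 := mcStep e1 t.2.2
        ((e2.1, e2.2, r.1, r.2) : PySem.Dict String String × Int × PySem.Dict String String × Int))
      (em, ec, rm, rc)
      = (((tl.flatMap fun t => [t.1, t.2.2]).foldl mcStep (em, ec)).1,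
         ((tl.flatMap fun t => [t.1, t.2.2]).foldl mcStep (em, ec)).2,
         ((tl.map fun t => t.2.1).foldl mcStep (rm, rc)).1,
         ((tl.map fun t => t.2.1).foldl mcStep (rm, rc)).2) := by
  induction tl with
  | nil => intro em ec rm rc; simp
  | cons t tl ih =>
    intro em ec rm rc
    simp only [List.foldl_cons, List.flatMap_cons, List.map_cons, List.foldl_append]
    rw [ih]
    simp

-- ---------- B-side ----------
theorem keys_insert_dict (d : PySem.Dict String Int) (k : String) (v : Int) :
    (d.insert k v).keys = if d.contains k then d.keys else d.keys ++ [k] := by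
  by_cases h : d.contains k
  · simp only [PySem.Dict.insert, h, if_true, PySem.Dict.keys, List.map_map]
    apply List.map_congr_left
    intro p _
    simp only [Function.comp_apply]
    by_cases hpk : p.1 = k
    · simp [hpk]
    · simp [hpk]
  · simp only [PySem.Dict.insert, h, PySem.Dict.keys]
    simp

def rdFold (l : List (Int × String)) : PySem.Dict String Int :=
  l.reverse.foldl (fun d p => d.insert p.2 p.1) PySem.Dict.empty

theorem rdFold_cons (p : Int × String) (l : List (Int × String)) :
    rdFold (p :: l) = (rdFold l).insert p.2 p.1 := by
  simp [rdFold, List.foldl_append]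

theorem get?_rdFold_enum (ks : List String) : ∀ (s : Int) (k : String),
    (rdFold (PySem.List.enumerate ks s)).get? k
      = if k ∈ ks then some ((List.idxOf k ks : Int) + s) else none := by
  induction ks with
  | nil => intro s k; simp [PySem.List.enumerate_nil, rdFold, PySem.Dict.get?, PySem.Dict.empty]
  | cons k' ks ih =>
    intro s k
    rw [PySem.List.enumerate_cons, rdFold_cons, PySem.Dict.get?_insert]
    by_cases hk : k = k'
    · subst hk; simp
    · simp only [hk, if_false, ih (s + 1) k]
      by_cases hm : k ∈ ks
      · have : k ∈ k' :: ks := List.mem_cons_of_mem _ hm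
        simp only [hm, if_true, this, if_true]
        rw [List.idxOf_cons_ne _ (by exact fun h => hk h.symm)]
        push_cast
        ring_nf
      · have : k ∉ k' :: ks := by simp [hk, hm]
        simp [hm, this]

theorem keys_rdFold_enum (ks : List String) : ∀ (s : Int),
    (rdFold (PySem.List.enumerate ks s)).keys = PySem.List.dedup ks.reverse := by
  induction ks with
  | nil => intro s; simp [PySem.List.enumerate_nil, rdFold, PySem.Dict.keys, PySem.Dict.empty,
      PySem.List.dedup_eq_ofList, PySem.Set.ofList]
  | cons k ks ih =>
    intro s
    rw [PySem.List.enumerate_cons, rdFold_cons, keys_insert_dict,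
      PySem.Dict.contains_eq_decide_mem_keys, ih (s + 1)]
    have hrev : PySem.List.dedup ((k :: ks).reverse) = PySem.List.dedup (ks.reverse ++ [k]) := by
      simp
    by_cases hk : k ∈ ks
    · rw [hrev, dedup_append_mem _ _ (by simpa using hk)]
      simp [PySem.List.dedup_eq_ofList, PySem.Set.mem_ofList, hk]
    · rw [hrev, dedup_append_not_mem _ _ (by simpa using hk)]
      simp [PySem.List.dedup_eq_ofList, PySem.Set.mem_ofList, hk]

theorem getD_rankDict (ks : List String) (k : String) (h : k ∈ ks) :
    (rankDict ks).getD k 0 = (List.idxOf k ks : Int) := by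
  have hr : rankDict ks = rdFold (PySem.List.enumerate ks 0) := rfl
  rw [hr, PySem.Dict.getD_eq_get?_getD, get?_rdFold_enum ks 0 k]
  simp [h]

theorem mem_dedup_iff (ks : List String) (a : String) :
    a ∈ PySem.List.dedup ks ↔ a ∈ ks := by
  simp [PySem.List.dedup_eq_ofList, PySem.Set.mem_ofList]

theorem pairwise_idxOf_dedup (ks : List String) :
    List.Pairwise (fun a b => List.idxOf a ks < List.idxOf b ks) (PySem.List.dedup ks) := by
  induction ks using List.reverseRecOn with
  | nil => simp [PySem.List.dedup_eq_ofList, PySem.Set.ofList]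
  | append_singleton ks k ih =>
    by_cases hk : k ∈ ks
    · rw [dedup_append_mem ks k hk]
      refine List.Pairwise.imp_of_mem ?_ ih
      intro a b ha hb hab
      rw [List.idxOf_append_of_mem ((mem_dedup_iff ks a).mp ha),
        List.idxOf_append_of_mem ((mem_dedup_iff ks b).mp hb)]
      exact hab
    · rw [dedup_append_not_mem ks k hk, List.pairwise_append]
      refine ⟨?_, by simp, ?_⟩
      · refine List.Pairwise.imp_of_mem ?_ ih
        intro a b ha hb hab
        rw [List.idxOf_append_of_mem ((mem_dedup_iff ks a).mp ha),
          List.idxOf_append_of_mem ((mem_dedup_iff ks b).mp hb)]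
        exact hab
      · intro a ha b hb
        have hb' : b = k := by simpa using hb
        subst hb'
        have haks : a ∈ ks := (mem_dedup_iff ks a).mp ha
        rw [List.idxOf_append_of_mem haks, List.idxOf_append_of_notMem hk]
        have h1 : List.idxOf a ks < ks.length := List.idxOf_lt_length_of_mem haks
        simpa using h1

theorem sorted_keys_rankDict (ks : List String) :
    PySem.List.sorted (rankDict ks).keys (fun k => (rankDict ks).getD k 0)
      = PySem.List.dedup ks := by
  apply PySem.List.sorted_eq_of_perm_of_pairwise_lt
  · have hkeys : (rankDict ks).keys = PySem.List.dedup ks.reverse := keys_rdFold_enum ks 0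
    rw [hkeys]
    apply (List.perm_ext_iff_of_nodup ?_ ?_).mpr
    · intro a
      simp
    · rw [PySem.List.dedup_eq_ofList]; exact PySem.Set.nodup_ofList ks
    · rw [PySem.List.dedup_eq_ofList]; exact PySem.Set.nodup_ofList ks.reverse
  · refine List.Pairwise.imp_of_mem ?_ (pairwise_idxOf_dedup ks)
    intro a b ha hb hab
    rw [getD_rankDict ks a ((mem_dedup_iff ks a).mp ha),
      getD_rankDict ks b ((mem_dedup_iff ks b).mp hb)]
    exact_mod_cast hab

theorem rank_eq_canonItems (ks : List String) : rank ks = canonItems ks := by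
  simp only [rank, canonItems, sorted_keys_rankDict]

-- ===== VERDICT (by name: the statement is the Claim_ definition above) =====
theorem map_constituents_spec : Claim_equal_map_constituents := by
  intro tl _
  show map_constituents tl = map_constituents_alt tl
  unfold map_constituents map_constituents_alt
  rw [rank_eq_canonItems, rank_eq_canonItems]
  rw [show ((PySem.Dict.empty, 0, PySem.Dict.empty, 0) :
      PySem.Dict String String × Int × PySem.Dict String String × Int)
      = (idxD [], ((PySem.List.dedup ([] : List String)).length : Int),
         idxD [], ((PySem.List.dedup ([] : List String)).length : Int)) from rfl]
  rw [foldl_split tl, foldl_mcStep_idxD _ [], foldl_mcStep_idxD _ []]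
  simp [idxD]
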